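-- pv_equiv track=rewrite | github.com/patriziorenelli/Esonero-Algoritmi | TopDownMem.py | contaPercorsi
-- ===== SOURCE A (Python) =====
-- def trovaPercorsi(x, y, k, di,mat):
--
--     if (mat[x][y][k][di] != 0):
--         return mat[x][y][k][di]
--
--     if (x == 0 and y == 0):
--         mat[x][y][k][di]= 1
--
--     if (di):
--         if(x-1 >= 0):
--             mat[x][y][k][di] = trovaPercorsi(x - 1, y, k, di, mat)
--         if( y-1 >= 0 and k-1 >= 0):
--              mat[x][y][k][di] +=trovaPercorsi(x, y - 1, k - 1, not di, mat)
--         return mat[x][y][k][di]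
--
--     else:
--         if(x-1 >= 0 and k-1 >= 0):
--
--             mat[x][y][k][di] = trovaPercorsi(x - 1, y, k - 1, not di, mat)
--         if(y-1 >=0):
--             mat[x][y][k][di] += trovaPercorsi(x, y - 1, k, di, mat)
--         return mat[x][y][k][di]
--
-- def contaPercorsi(n, k):
--
--     if(n <0):
--          return -1
--     if(k<0):
--         return -1
--     if ( n == 0):
--        return 0
--     if ( n == 1):
--         return 1
--
--     if( k == 0 ):
--         return 0
--
--     mat = [[[[ 0 for _ in range(2)] for _ in range(k+1)] for _ in range(n)] for _ in range(n)]
--     n-=1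
--     return  trovaPercorsi(n - 1, n, k, True, mat) + trovaPercorsi(n, n - 1, k, False, mat)
-- ===== SOURCE B (Python) =====
-- def contaPercorsi(n, k):
--     if n < 0:
--         return -1
--     if k < 0:
--         return -1
--     if n == 0:
--         return 0
--     if n == 1:
--         return 1
--     if k == 0:
--         return 0
--     # bottom-up tabulation of the same recurrence, row-major fill
--     dp = [[[[0, 0] for _ in range(k + 1)] for _ in range(n)] for _ in range(n)]
--     for x in range(n):
--         for y in range(n):
--             for kk in range(k + 1):
--                 base = 1 if x == 0 and y == 0 else 0
--                 dp[x][y][kk][1] = base \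
--                     + (dp[x - 1][y][kk][1] if x > 0 else 0) \
--                     + (dp[x][y - 1][kk - 1][0] if y > 0 and kk > 0 else 0)
--                 dp[x][y][kk][0] = base \
--                     + (dp[x - 1][y][kk - 1][1] if x > 0 and kk > 0 else 0) \
--                     + (dp[x][y - 1][kk][0] if y > 0 else 0)
--     m = n - 1
--     return dp[m - 1][m][k][1] + dp[m][m - 1][k][0]
-- ===== Notes on version B (the rewrite author's own statement) =====
-- stated objective: alternative
-- what changed: The recursive memoized helper trovaPercorsi is replaced by bottom-up tabulation: three nested loops fill the same dp[x][y][k][di] table in row-major order, keeping the outer guard chain and the final dp[n-2][n-1][k][1] + dp[n-1][n-2][k][0] read.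
import Mathlib
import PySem

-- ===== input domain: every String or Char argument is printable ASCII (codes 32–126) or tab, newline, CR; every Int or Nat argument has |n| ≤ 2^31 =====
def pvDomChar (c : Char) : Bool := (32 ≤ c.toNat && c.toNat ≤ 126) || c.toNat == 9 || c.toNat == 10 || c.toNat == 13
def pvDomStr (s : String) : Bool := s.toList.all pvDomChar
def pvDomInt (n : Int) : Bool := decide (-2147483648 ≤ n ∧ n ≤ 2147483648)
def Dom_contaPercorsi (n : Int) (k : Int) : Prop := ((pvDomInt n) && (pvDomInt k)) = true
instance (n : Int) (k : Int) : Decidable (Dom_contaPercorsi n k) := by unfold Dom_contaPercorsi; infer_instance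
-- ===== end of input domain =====

-- B replaces A's memoized top-down recursion by bottom-up tabulation of the same recurrence (objective: alternative).

-- The Python 4-D list `mat`/`dp` (indices always in range: every access is guarded by `>= 0`
-- checks and the table is allocated large enough, so list indexing never raises) is represented
-- as a finite map from the index quadruple to the stored Int; absent key = the 0 the table is
-- initialised with.  mget/mset are exactly Python's `mat[x][y][k][di]` read/write.
def Tbl : Type := Std.HashMap (Nat × Nat × Nat × Bool) Int

def mget (mat : Tbl) (x y k : Nat) (di : Bool) : Int := Std.HashMap.getD mat (x, y, k, di) 0
def mset (mat : Tbl) (x y k : Nat) (di : Bool) (v : Int) : Tbl := Std.HashMap.insert mat (x, y, k, di) v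

-- ===== PORT A =====
-- exact transliteration of trovaPercorsi; Python's in-place mutation of `mat` is threaded as state
-- (the returned Tbl is the mutated table).  `x - 1 >= 0` on the nonnegative ints used here is `1 ≤ x`.
def trova (x y k : Nat) (di : Bool) (mat : Tbl) : Int × Tbl :=
  if mget mat x y k di ≠ 0 then (mget mat x y k di, mat)
  else
    let mat1 := if x = 0 ∧ y = 0 then mset mat x y k di 1 else mat
    if di then
      let p :=
        if _h : 1 ≤ x then
          let r := trova (x-1) y k true mat1
          mset r.2 x y k di r.1
        else mat1
      let q :=
        if _h : 1 ≤ y ∧ 1 ≤ k then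
          let r := trova x (y-1) (k-1) false p
          mset r.2 x y k di (mget r.2 x y k di + r.1)
        else p
      (mget q x y k di, q)
    else
      let p :=
        if _h : 1 ≤ x ∧ 1 ≤ k then
          let r := trova (x-1) y (k-1) true mat1
          mset r.2 x y k di r.1
        else mat1
      let q :=
        if _h : 1 ≤ y then
          let r := trova x (y-1) k false p
          mset r.2 x y k di (mget r.2 x y k di + r.1)
        else p
      (mget q x y k di, q)
termination_by x + y
decreasing_by all_goals omega

def contaPercorsi (n : Int) (k : Int) : Int :=
  if n < 0 then -1
  else if k < 0 then -1
  else if n = 0 then 0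
  else if n = 1 then 1
  else if k = 0 then 0
  else
    -- here n ≥ 2 and k ≥ 1, so n-1 and k are nonnegative and toNat is exact
    let mat : Tbl := Std.HashMap.emptyWithCapacity              -- the freshly allocated all-zero table
    let m := (n - 1).toNat                         -- Python's n -= 1
    let r1 := trova (m - 1) m k.toNat true mat
    let r2 := trova m (m - 1) k.toNat false r1.2
    r1.1 + r2.1

-- ===== PORT B =====
-- bottom-up tabulation (Source B): innermost body of the three nested loops
def fillCell (x y : Nat) (dp : Tbl) (kk : Nat) : Tbl :=
  let base : Int := if x = 0 ∧ y = 0 then 1 else 0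
  let v1 := base + (if 1 ≤ x then mget dp (x-1) y kk true else 0)
                 + (if 1 ≤ y ∧ 1 ≤ kk then mget dp x (y-1) (kk-1) false else 0)
  let dp1 := mset dp x y kk true v1
  let v0 := base + (if 1 ≤ x ∧ 1 ≤ kk then mget dp1 (x-1) y (kk-1) true else 0)
                 + (if 1 ≤ y then mget dp1 x (y-1) kk false else 0)
  mset dp1 x y kk false v0

-- `for kk in range(k+1)`
def fillRow (kmax x : Nat) (dp : Tbl) (y : Nat) : Tbl :=
  (List.range (kmax+1)).foldl (fillCell x y) dp

-- `for y in range(n)`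
def fillAll (nn kmax : Nat) (dp : Tbl) (x : Nat) : Tbl :=
  (List.range nn).foldl (fillRow kmax x) dp

def contaPercorsi_alt (n : Int) (k : Int) : Int :=
  if n < 0 then -1
  else if k < 0 then -1
  else if n = 0 then 0
  else if n = 1 then 1
  else if k = 0 then 0
  else
    let nn := n.toNat
    let kmax := k.toNat
    let dp := (List.range nn).foldl (fillAll nn kmax) Std.HashMap.emptyWithCapacity  -- `for x in range(n)`
    let m := nn - 1
    mget dp (m-1) m kmax true + mget dp m (m-1) kmax false

-- ===== PRECONDITION & SPEC =====
def Spec_contaPercorsi (n : Int) (k : Int) (out : Int) : Prop := out = contaPercorsi_alt n k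
instance (n : Int) (k : Int) (out : Int) : Decidable (Spec_contaPercorsi n k out) := by unfold Spec_contaPercorsi; infer_instance

-- ===== CLAIM (what is proved, stated in full; the proofs are below) =====
def Claim_equal_contaPercorsi : Prop := ∀ (n : Int) (k : Int), Dom_contaPercorsi n k → Spec_contaPercorsi n k (contaPercorsi n k)

-- ===== LEMMAS AND PROOFS =====

-- the pure recurrence both programs compute
def f : Nat → Nat → Nat → Bool → Int
  | x, y, k, di =>
    (if x = 0 ∧ y = 0 then (1:Int) else 0) +
    (if di then
      (if _h : 1 ≤ x then f (x-1) y k true else 0) +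
      (if _h : 1 ≤ y ∧ 1 ≤ k then f x (y-1) (k-1) false else 0)
    else
      (if _h : 1 ≤ x ∧ 1 ≤ k then f (x-1) y (k-1) true else 0) +
      (if _h : 1 ≤ y then f x (y-1) k false else 0))
termination_by x y _ _ => x + y
decreasing_by all_goals omega

theorem f_eq (x y k : Nat) (di : Bool) :
    f x y k di =
    (if x = 0 ∧ y = 0 then (1:Int) else 0) +
    (if di then
      (if 1 ≤ x then f (x-1) y k true else 0) +
      (if 1 ≤ y ∧ 1 ≤ k then f x (y-1) (k-1) false else 0)
    else
      (if 1 ≤ x ∧ 1 ≤ k then f (x-1) y (k-1) true else 0) +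
      (if 1 ≤ y then f x (y-1) k false else 0)) := by
  rw [f]; split_ifs <;> rfl

theorem f_zero (k : Nat) (di : Bool) : f 0 0 k di = 1 := by
  rw [f_eq]; cases di <;> simp

theorem mget_mset (m : Tbl) (a b c : Nat) (d : Bool) (v : Int) (x y k : Nat) (di : Bool) :
    mget (mset m a b c d v) x y k di =
    if x = a ∧ y = b ∧ k = c ∧ di = d then v else mget m x y k di := by
  rw [mget, mset, Std.HashMap.getD_insert]
  by_cases h : x = a ∧ y = b ∧ k = c ∧ di = d
  · obtain ⟨rfl, rfl, rfl, rfl⟩ := h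
    rw [if_pos (beq_self_eq_true ((x, y, k, di) : Nat × Nat × Nat × Bool)), if_pos ⟨rfl, rfl, rfl, rfl⟩]
  · have hne : ¬((a, b, c, d) == (x, y, k, di)) = true := by
      intro hbeq
      have he := eq_of_beq hbeq
      rw [Prod.mk.injEq, Prod.mk.injEq, Prod.mk.injEq] at he
      exact h ⟨he.1.symm, he.2.1.symm, he.2.2.1.symm, he.2.2.2.symm⟩
    rw [if_neg h, if_neg hne]
    rfl

theorem mget_empty (x y k : Nat) (di : Bool) : mget Std.HashMap.emptyWithCapacity x y k di = 0 := by
  rw [mget, Std.HashMap.getD_emptyWithCapacity]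

def GoodU (mat : Tbl) (s : Nat) : Prop :=
  ∀ x y k di, x + y ≤ s → (mget mat x y k di = 0 ∨ mget mat x y k di = f x y k di)

theorem GoodU_mono {m : Tbl} {s t : Nat} (h : GoodU m s) (ht : t ≤ s) : GoodU m t :=
  fun a b c d hab => h a b c d (le_trans hab ht)

theorem GoodU_mset_high {m : Tbl} {s : Nat} (x y k : Nat) (di : Bool) (v : Int)
    (h : GoodU m s) (hs : s < x + y) : GoodU (mset m x y k di v) s := by
  intro a b c d hab
  rw [mget_mset, if_neg (by rintro ⟨rfl, rfl, -, -⟩; omega)]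
  exact h a b c d hab

theorem stage_finish (x y k : Nat) (di : Bool) (mat R : Tbl) (v : Int)
    (hG : GoodU mat (x+y))
    (hv : v = f x y k di)
    (rGood : GoodU R (x+y-1))
    (rHigh : ∀ a b c d, ¬(a = x ∧ b = y ∧ c = k ∧ d = di) → x + y ≤ a + b →
        mget R a b c d = mget mat a b c d) :
    mget (mset R x y k di v) x y k di = f x y k di ∧
    GoodU (mset R x y k di v) (x+y) ∧
    (∀ a b c d, x + y < a + b → mget (mset R x y k di v) a b c d = mget mat a b c d) := by
  refine ⟨by rw [mget_mset, if_pos ⟨rfl, rfl, rfl, rfl⟩]; exact hv, ?_, ?_⟩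
  · intro a b c d hab
    rw [mget_mset]
    split_ifs with hc
    · obtain ⟨rfl, rfl, rfl, rfl⟩ := hc
      exact Or.inr hv
    · by_cases hlow : a + b ≤ x + y - 1
      · exact rGood a b c d hlow
      · rw [rHigh a b c d hc (by omega)]
        exact hG a b c d hab
  · intro a b c d hab
    rw [mget_mset, if_neg (by rintro ⟨rfl, rfl, -, -⟩; omega)]
    exact rHigh a b c d (by rintro ⟨rfl, rfl, -, -⟩; omega) (by omega)

theorem trova_correct : ∀ (s x y k : Nat) (di : Bool) (mat : Tbl), x + y ≤ s → GoodU mat (x+y) →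
    (trova x y k di mat).1 = f x y k di ∧
    GoodU (trova x y k di mat).2 (x+y) ∧
    (∀ a b c d, x + y < a + b → mget (trova x y k di mat).2 a b c d = mget mat a b c d) := by
  intro s
  induction s using Nat.strong_induction_on with
  | _ s ih =>
    intro x y k di mat hs hG
    rw [trova]
    by_cases hmemo : mget mat x y k di = 0
    · -- memo miss
      rw [if_neg (show ¬(mget mat x y k di ≠ 0) from fun h => h hmemo)]
      set m1 := if x = 0 ∧ y = 0 then mset mat x y k di 1 else mat with hm1
      have m1Good : GoodU m1 (x+y) := by
        rw [hm1]; split_ifs with h00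
        · obtain ⟨rfl, rfl⟩ := h00
          intro a b c d hab
          rw [mget_mset]
          split_ifs with hc
          · obtain ⟨rfl, rfl, rfl, rfl⟩ := hc
            exact Or.inr (f_zero _ _).symm
          · exact hG a b c d hab
        · exact hG
      have m1get : mget m1 x y k di = (if x = 0 ∧ y = 0 then 1 else 0) := by
        rw [hm1]; split_ifs with h00
        · rw [mget_mset, if_pos ⟨rfl, rfl, rfl, rfl⟩]
        · exact hmemo
      have m1other : ∀ a b c d, ¬(a = x ∧ b = y ∧ c = k ∧ d = di) →
          mget m1 a b c d = mget mat a b c d := by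
        intro a b c d hne
        rw [hm1]; split_ifs with h00
        · rw [mget_mset, if_neg hne]
        · rfl
      clear hm1
      cases di with
      | true =>
        rw [if_pos (show true = true from rfl)]
        dsimp only
        by_cases hx : 1 ≤ x
        · rw [dif_pos hx]
          obtain ⟨e1, g1, u1⟩ :=
            ih ((x-1)+y) (by omega) (x-1) y k true m1 le_rfl (GoodU_mono m1Good (by omega))
          set r1 := trova (x-1) y k true m1 with hr1
          have PHigh : ∀ a b c d, ¬(a = x ∧ b = y ∧ c = k ∧ d = true) → x + y ≤ a + b →
              mget (mset r1.2 x y k true r1.1) a b c d = mget mat a b c d := by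
            intro a b c d hne hab
            rw [mget_mset, if_neg hne, u1 a b c d (by omega), m1other a b c d hne]
          by_cases hyk : 1 ≤ y ∧ 1 ≤ k
          · rw [dif_pos hyk]
            obtain ⟨e2, g2, u2⟩ :=
              ih (x+(y-1)) (by omega) x (y-1) (k-1) false (mset r1.2 x y k true r1.1) le_rfl
                (GoodU_mono (GoodU_mset_high x y k true r1.1 g1 (by omega)) (by omega))
            set r2 := trova x (y-1) (k-1) false (mset r1.2 x y k true r1.1) with hr2
            refine stage_finish x y k true mat r2.2 _ hG ?_ (GoodU_mono g2 (by omega)) ?_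
            · rw [u2 x y k true (by omega), mget_mset, if_pos ⟨rfl, rfl, rfl, rfl⟩, e1, e2,
                f_eq x y k true, if_pos rfl, if_pos hx, if_pos hyk, if_neg (by omega)]
              ring
            · intro a b c d hne hab
              rw [u2 a b c d (by omega)]
              exact PHigh a b c d hne hab
          · rw [dif_neg hyk]
            refine stage_finish x y k true mat r1.2 _ hG ?_ (GoodU_mono g1 (by omega)) ?_
            · rw [e1, f_eq x y k true, if_pos rfl, if_pos hx, if_neg hyk, if_neg (by omega)]
              ring
            · intro a b c d hne hab
              rw [u1 a b c d (by omega), m1other a b c d hne]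
        · rw [dif_neg hx]
          by_cases hyk : 1 ≤ y ∧ 1 ≤ k
          · rw [dif_pos hyk]
            obtain ⟨e2, g2, u2⟩ :=
              ih (x+(y-1)) (by omega) x (y-1) (k-1) false m1 le_rfl (GoodU_mono m1Good (by omega))
            set r2 := trova x (y-1) (k-1) false m1 with hr2
            refine stage_finish x y k true mat r2.2 _ hG ?_ (GoodU_mono g2 (by omega)) ?_
            · rw [u2 x y k true (by omega), m1get, e2,
                f_eq x y k true, if_pos rfl, if_neg hx, if_pos hyk]
              ring
            · intro a b c d hne hab
              rw [u2 a b c d (by omega)]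
              exact m1other a b c d hne
          · rw [dif_neg hyk]
            refine ⟨?_, m1Good, fun a b c d hab => m1other a b c d (by rintro ⟨rfl, rfl, -, -⟩; omega)⟩
            rw [m1get, f_eq x y k true, if_pos rfl, if_neg hx, if_neg hyk]
            ring
      | false =>
        rw [if_neg (show ¬false = true by simp)]
        dsimp only
        by_cases hxk : 1 ≤ x ∧ 1 ≤ k
        · rw [dif_pos hxk]
          obtain ⟨e1, g1, u1⟩ :=
            ih ((x-1)+y) (by omega) (x-1) y (k-1) true m1 le_rfl (GoodU_mono m1Good (by omega))
          set r1 := trova (x-1) y (k-1) true m1 with hr1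
          have PHigh : ∀ a b c d, ¬(a = x ∧ b = y ∧ c = k ∧ d = false) → x + y ≤ a + b →
              mget (mset r1.2 x y k false r1.1) a b c d = mget mat a b c d := by
            intro a b c d hne hab
            rw [mget_mset, if_neg hne, u1 a b c d (by omega), m1other a b c d hne]
          by_cases hy : 1 ≤ y
          · rw [dif_pos hy]
            obtain ⟨e2, g2, u2⟩ :=
              ih (x+(y-1)) (by omega) x (y-1) k false (mset r1.2 x y k false r1.1) le_rfl
                (GoodU_mono (GoodU_mset_high x y k false r1.1 g1 (by omega)) (by omega))
            set r2 := trova x (y-1) k false (mset r1.2 x y k false r1.1) with hr2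
            refine stage_finish x y k false mat r2.2 _ hG ?_ (GoodU_mono g2 (by omega)) ?_
            · rw [u2 x y k false (by omega), mget_mset, if_pos ⟨rfl, rfl, rfl, rfl⟩, e1, e2,
                f_eq x y k false, if_neg (show ¬false = true by simp), if_pos hxk, if_pos hy,
                if_neg (by omega)]
              ring
            · intro a b c d hne hab
              rw [u2 a b c d (by omega)]
              exact PHigh a b c d hne hab
          · rw [dif_neg hy]
            refine stage_finish x y k false mat r1.2 _ hG ?_ (GoodU_mono g1 (by omega)) ?_
            · rw [e1, f_eq x y k false, if_neg (show ¬false = true by simp), if_pos hxk, if_neg hy,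
                if_neg (by omega)]
              ring
            · intro a b c d hne hab
              rw [u1 a b c d (by omega), m1other a b c d hne]
        · rw [dif_neg hxk]
          by_cases hy : 1 ≤ y
          · rw [dif_pos hy]
            obtain ⟨e2, g2, u2⟩ :=
              ih (x+(y-1)) (by omega) x (y-1) k false m1 le_rfl (GoodU_mono m1Good (by omega))
            set r2 := trova x (y-1) k false m1 with hr2
            refine stage_finish x y k false mat r2.2 _ hG ?_ (GoodU_mono g2 (by omega)) ?_
            · rw [u2 x y k false (by omega), m1get, e2,
                f_eq x y k false, if_neg (show ¬false = true by simp), if_neg hxk, if_pos hy]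
              ring
            · intro a b c d hne hab
              rw [u2 a b c d (by omega)]
              exact m1other a b c d hne
          · rw [dif_neg hy]
            refine ⟨?_, m1Good, fun a b c d hab => m1other a b c d (by rintro ⟨rfl, rfl, -, -⟩; omega)⟩
            rw [m1get, f_eq x y k false, if_neg (show ¬false = true by simp), if_neg hxk, if_neg hy]
            ring
    · -- memo hit: the stored value is f by GoodU
      rw [if_pos hmemo]
      refine ⟨?_, hG, fun _ _ _ _ _ => rfl⟩
      rcases hG x y k di le_rfl with h | h
      · exact absurd h hmemo
      · exact h

-- agreement of the tabulation with f on the already-filled region: rows below (X,Y) in the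
-- row-major fill order, y-index < nn, k-index ≤ kmax
def AgreeB (dp : Tbl) (nn kmax X Y : Nat) : Prop :=
  ∀ x y kk di, y < nn → kk ≤ kmax → (x < X ∨ (x = X ∧ y < Y)) → mget dp x y kk di = f x y kk di

theorem fillCell_other (x y kk : Nat) (dp : Tbl) (a b c : Nat) (d : Bool)
    (h : ¬(a = x ∧ b = y ∧ c = kk)) :
    mget (fillCell x y dp kk) a b c d = mget dp a b c d := by
  simp only [fillCell, mget_mset]
  rw [if_neg (by tauto), if_neg (by tauto)]

theorem fillCell_self (x y kk : Nat) (dp : Tbl)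
    (h1 : 1 ≤ x → mget dp (x-1) y kk true = f (x-1) y kk true)
    (h2 : 1 ≤ y → 1 ≤ kk → mget dp x (y-1) (kk-1) false = f x (y-1) (kk-1) false)
    (h3 : 1 ≤ x → 1 ≤ kk → mget dp (x-1) y (kk-1) true = f (x-1) y (kk-1) true)
    (h4 : 1 ≤ y → mget dp x (y-1) kk false = f x (y-1) kk false) :
    ∀ di, mget (fillCell x y dp kk) x y kk di = f x y kk di := by
  intro di
  simp only [fillCell]
  cases di with
  | true =>
    rw [mget_mset, if_neg (by simp), mget_mset, if_pos (by simp), f_eq, if_pos (show true = true from rfl)]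
    have e1 : (if 1 ≤ x then mget dp (x-1) y kk true else 0)
            = (if 1 ≤ x then f (x-1) y kk true else 0) := by
      split_ifs with h
      · exact h1 h
      · rfl
    have e2 : (if 1 ≤ y ∧ 1 ≤ kk then mget dp x (y-1) (kk-1) false else 0)
            = (if 1 ≤ y ∧ 1 ≤ kk then f x (y-1) (kk-1) false else 0) := by
      split_ifs with h
      · exact h2 h.1 h.2
      · rfl
    rw [e1, e2]; ring
  | false =>
    rw [mget_mset, if_pos (by simp), f_eq, if_neg (show ¬false = true by simp)]
    have e3 : ∀ v : Int, (if 1 ≤ x ∧ 1 ≤ kk then mget (mset dp x y kk true v) (x-1) y (kk-1) true else 0)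
            = (if 1 ≤ x ∧ 1 ≤ kk then f (x-1) y (kk-1) true else 0) := by
      intro v; split_ifs with h
      · rw [mget_mset, if_neg (by rintro ⟨c1, -, -, -⟩; omega)]
        exact h3 h.1 h.2
      · rfl
    have e4 : ∀ v : Int, (if 1 ≤ y then mget (mset dp x y kk true v) x (y-1) kk false else 0)
            = (if 1 ≤ y then f x (y-1) kk false else 0) := by
      intro v; split_ifs with h
      · rw [mget_mset, if_neg (by simp)]
        exact h4 h
      · rfl
    rw [e3, e4]; ring

theorem kfold (nn kmax x y : Nat) (hy : y < nn) (l : List Nat) :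
    ∀ (dp : Tbl), (∀ kk ∈ l, kk ≤ kmax) → AgreeB dp nn kmax x y →
    (∀ a b c d, ¬(a = x ∧ b = y) → mget (l.foldl (fillCell x y) dp) a b c d = mget dp a b c d) ∧
    (∀ kk di, (kk ∈ l ∨ mget dp x y kk di = f x y kk di) → kk ≤ kmax →
        mget (l.foldl (fillCell x y) dp) x y kk di = f x y kk di) := by
  induction l with
  | nil =>
    intro dp _ _
    refine ⟨fun _ _ _ _ _ => rfl, fun kk di h _ => ?_⟩
    rcases h with h | h
    · simp at h
    · simpa using h
  | cons a t ih =>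
    intro dp hl hB
    have ha : a ≤ kmax := hl a (by simp)
    have hself := fillCell_self x y a dp
      (fun hx => hB (x-1) y a true hy ha (Or.inl (by omega)))
      (fun hyy hk => hB x (y-1) (a-1) false (by omega) (by omega) (Or.inr ⟨rfl, by omega⟩))
      (fun hx hk => hB (x-1) y (a-1) true hy (by omega) (Or.inl (by omega)))
      (fun hyy => hB x (y-1) a false (by omega) ha (Or.inr ⟨rfl, by omega⟩))
    have hB' : AgreeB (fillCell x y dp a) nn kmax x y := by
      intro p q c d hq hc hlex
      rw [fillCell_other x y a dp p q c d (by rintro ⟨rfl, rfl, -⟩; omega)]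
      exact hB p q c d hq hc hlex
    obtain ⟨ih1, ih2⟩ := ih (fillCell x y dp a) (fun kk hk => hl kk (by simp [hk])) hB'
    refine ⟨?_, ?_⟩
    · intro p q c d hpq
      rw [List.foldl_cons, ih1 p q c d hpq, fillCell_other x y a dp p q c d (by tauto)]
    · intro kk di hmem hk
      rw [List.foldl_cons]
      rcases hmem with hm | hv
      · rcases List.mem_cons.mp hm with rfl | ht
        · exact ih2 kk di (Or.inr (hself di)) hk
        · exact ih2 kk di (Or.inl ht) hk
      · by_cases hka : kk = a
        · subst hka; exact ih2 kk di (Or.inr (hself di)) hk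
        · refine ih2 kk di (Or.inr ?_) hk
          rw [fillCell_other x y a dp x y kk di (by tauto)]; exact hv

theorem rowstep (nn kmax x y : Nat) (hy : y < nn) (dp : Tbl) (hB : AgreeB dp nn kmax x y) :
    AgreeB (fillRow kmax x dp y) nn kmax x (y+1) := by
  obtain ⟨h1, h2⟩ := kfold nn kmax x y hy (List.range (kmax+1)) dp
    (fun kk hk => by have := List.mem_range.mp hk; omega) hB
  intro p q c d hq hc hlex
  by_cases hpq : p = x ∧ q = y
  · obtain ⟨rfl, rfl⟩ := hpq
    exact h2 c d (Or.inl (List.mem_range.mpr (by omega))) hc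
  · rw [fillRow, h1 p q c d hpq]
    apply hB p q c d hq hc
    rcases hlex with h | ⟨rfl, h⟩
    · exact Or.inl h
    · exact Or.inr ⟨rfl, by omega⟩

theorem yfold (nn kmax x : Nat) (dp : Tbl) (hB : AgreeB dp nn kmax x 0) :
    ∀ j, j ≤ nn → AgreeB ((List.range j).foldl (fillRow kmax x) dp) nn kmax x j := by
  intro j
  induction j with
  | zero => intro _; simpa using hB
  | succ j ihj =>
    intro hj
    rw [List.range_succ, List.foldl_append, List.foldl_cons, List.foldl_nil]
    exact rowstep nn kmax x j (by omega) _ (ihj (by omega))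

theorem xstep (nn kmax x : Nat) (dp : Tbl) (hB : AgreeB dp nn kmax x 0) :
    AgreeB (fillAll nn kmax dp x) nn kmax (x+1) 0 := by
  have h := yfold nn kmax x dp hB nn le_rfl
  intro p q c d hq hc hlex
  apply h p q c d hq hc
  rcases hlex with hp | ⟨-, h0⟩
  · by_cases hpx : p = x
    · exact Or.inr ⟨hpx, hq⟩
    · exact Or.inl (by omega)
  · omega

theorem tab_correct (nn kmax : Nat) :
    AgreeB ((List.range nn).foldl (fillAll nn kmax) Std.HashMap.emptyWithCapacity) nn kmax nn 0 := by
  have aux : ∀ i, i ≤ nn → AgreeB ((List.range i).foldl (fillAll nn kmax) Std.HashMap.emptyWithCapacity) nn kmax i 0 := by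
    intro i
    induction i with
    | zero => intro _ p q c d _ _ hlex; rcases hlex with h | ⟨-, h⟩ <;> omega
    | succ i ihi =>
      intro hi
      rw [List.range_succ, List.foldl_append, List.foldl_cons, List.foldl_nil]
      exact xstep nn kmax i _ (ihi (by omega))
  exact aux nn le_rfl

-- ===== VERDICT (by name: the statement is the Claim_ definition above) =====
theorem contaPercorsi_spec : Claim_equal_contaPercorsi := by
  intro n k _hdom
  show contaPercorsi n k = contaPercorsi_alt n k
  unfold contaPercorsi contaPercorsi_alt
  split_ifs with h1 h2 h3 h4 h5 <;> try rfl
  dsimp only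
  have hm : (n - 1).toNat = n.toNat - 1 := by omega
  rw [hm]
  have hn2 : 2 ≤ n.toNat := by omega
  have hk1 : 1 ≤ k.toNat := by omega
  set nn := n.toNat with hnn
  set K := k.toNat with hK
  set m := nn - 1 with hmm
  have hGe : GoodU Std.HashMap.emptyWithCapacity ((m-1) + m) := fun a b c d _ => Or.inl (mget_empty a b c d)
  obtain ⟨a1, a2, a3⟩ := trova_correct ((m-1)+m) (m-1) m K true Std.HashMap.emptyWithCapacity le_rfl hGe
  obtain ⟨b1, _, _⟩ := trova_correct (m+(m-1)) m (m-1) K false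
      (trova (m-1) m K true Std.HashMap.emptyWithCapacity).2 le_rfl
      (by have h : m + (m-1) = (m-1) + m := by omega
          rw [h]; exact a2)
  rw [a1, b1]
  have hT := tab_correct nn K
  rw [hT (m-1) m K true (by omega) le_rfl (Or.inl (by omega)),
      hT m (m-1) K false (by omega) le_rfl (Or.inl (by omega))]
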